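-- pv_equiv track=rewrite | github.com/Renzzo98/DailyDealRedditBot | PC-Deals/main.py | getPrice
-- ===== SOURCE A (Python) =====
-- def getPrice(title):
--     if (title != None):
--         price = ""
--         recording = False
--         firstPriceInx = 0
--         for char in title:
--             if (char == "$"):
--                 recording = True
--                 firstPriceInx += 1
--             elif (char == "(" or char == ")"):
--                 recording = False
--             else:
--                 if (recording and firstPriceInx == 1):
--                     price += char
--         return price
--     else:
--         raise ValueError("Title was not provided when getting the price")
-- ===== SOURCE B (Python) =====
-- def getPrice(title):
--     if title is None:
--         raise ValueError("Title was not provided when getting the price")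
--     _, sep, rest = title.partition("$")
--     if not sep:
--         return ""
--     out = []
--     for ch in rest:
--         if ch in "$()":
--             break
--         out.append(ch)
--     return "".join(out)
-- ===== Notes on version B (the rewrite author's own statement) =====
-- stated objective: idiomatic
-- what changed: Replaces the recording-flag/counter state machine with str.partition at the first dollar sign followed by a collect-until-stop-char loop with break.
import Mathlib
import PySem

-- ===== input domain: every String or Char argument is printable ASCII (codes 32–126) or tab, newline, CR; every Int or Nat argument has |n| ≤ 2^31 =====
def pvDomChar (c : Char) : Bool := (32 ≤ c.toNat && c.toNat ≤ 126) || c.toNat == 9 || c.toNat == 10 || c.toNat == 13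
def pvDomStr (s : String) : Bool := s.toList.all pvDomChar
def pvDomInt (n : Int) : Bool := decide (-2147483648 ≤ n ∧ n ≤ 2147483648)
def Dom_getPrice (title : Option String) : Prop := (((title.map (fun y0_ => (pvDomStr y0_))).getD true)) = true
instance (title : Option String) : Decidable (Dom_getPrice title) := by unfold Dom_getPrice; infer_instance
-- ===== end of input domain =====

-- B replaces A's recording-flag/counter char loop with partition at the first '$' plus a
-- collect-until-stop-char loop (idiomatic, same cost); A and B both raise ValueError on None
-- (outside Pre_), and agree on every string.

-- ===== PORT A =====
-- the for-loop over title's characters, state (price, recording, firstPriceInx)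
def getPriceLoopA : List Char → String → Bool → Int → String
  | [], price, _, _ => price
  | c :: cs, price, recording, firstPriceInx =>
    if c = '$' then
      getPriceLoopA cs price true (firstPriceInx + 1)
    else if c = '(' ∨ c = ')' then
      getPriceLoopA cs price false firstPriceInx
    else if recording ∧ firstPriceInx = 1 then
      getPriceLoopA cs (price.push c) recording firstPriceInx
    else
      getPriceLoopA cs price recording firstPriceInx

def getPrice (title : Option String) : String :=
  match title with
  | some s => getPriceLoopA s.toList "" false 0
  | none => ""   -- Python raises ValueError here; excluded by Pre_getPrice

-- ===== PORT B =====
-- the for-loop with break: collect chars until one of "$()" is seen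
def getPriceLoopB : List Char → List Char
  | [] => []
  | c :: cs => if c = '$' ∨ c = '(' ∨ c = ')' then [] else c :: getPriceLoopB cs

def getPrice_alt (title : Option String) : String :=
  match title with
  | none => ""   -- Python B raises ValueError here; excluded by Pre_getPrice
  | some s =>
    -- title.partition("$"): hand port, exact — position of the first '$' via Chars.find;
    -- -1 means no separator (Python's `if not sep: return ""`), otherwise rest = chars after it
    let i := PySem.Chars.find s.toList ['$']
    if i = -1 then ""
    else String.ofList (getPriceLoopB (s.toList.drop (i.toNat + 1)))

-- ===== PRECONDITION & SPEC =====
-- Pre_ excludes only title = none, where the Python A raises ValueError.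
def Pre_getPrice (title : Option String) : Prop := title ≠ none
instance (title : Option String) : Decidable (Pre_getPrice title) := by unfold Pre_getPrice; infer_instance
def pvWitness_getPrice : Option String := some "deal $5.99 (50% off)"

def Spec_getPrice (title : Option String) (out : String) : Prop := out = getPrice_alt title
instance (title : Option String) (out : String) : Decidable (Spec_getPrice title out) := by unfold Spec_getPrice; infer_instance

-- ===== CLAIM (what is proved, stated in full; the proofs are below) =====
def Claim_equal_getPrice : Prop := ∀ (title : Option String), Dom_getPrice title → Pre_getPrice title → Spec_getPrice title (getPrice title)

-- ===== LEMMAS AND PROOFS =====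

-- once firstPriceInx ≥ 2, or recording is off with firstPriceInx ≥ 1, no char is ever added
theorem getPriceLoopA_dead : ∀ (l : List Char) (p : String) (r : Bool) (i : Int),
    (2 ≤ i ∨ (r = false ∧ 1 ≤ i)) → getPriceLoopA l p r i = p := by
  intro l
  induction l with
  | nil => intro p r i _; rfl
  | cons c cs ih =>
    intro p r i h
    simp only [getPriceLoopA]
    by_cases h1 : c = '$'
    · rw [if_pos h1]
      exact ih p true (i + 1) (Or.inl (by rcases h with h | ⟨_, h⟩ <;> omega))
    · rw [if_neg h1]
      by_cases h2 : c = '(' ∨ c = ')'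
      · rw [if_pos h2]
        refine ih p false i ?_
        rcases h with h | ⟨_, h⟩
        · exact Or.inl h
        · exact Or.inr ⟨rfl, h⟩
      · rw [if_neg h2]
        have h3 : ¬ (r = true ∧ i = 1) := by
          rintro ⟨hr, hi⟩
          rcases h with h | ⟨hf, _⟩
          · omega
          · rw [hr] at hf; exact Bool.noConfusion hf
        rw [if_neg h3]
        exact ih p r i h

-- in the live state (recording, firstPriceInx = 1) A appends exactly what B's loop collects
theorem getPriceLoopA_live : ∀ (l : List Char) (p : String),
    getPriceLoopA l p true 1 = p ++ String.ofList (getPriceLoopB l) := by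
  intro l
  induction l with
  | nil => intro p; simp [getPriceLoopA, getPriceLoopB]
  | cons c cs ih =>
    intro p
    simp only [getPriceLoopA, getPriceLoopB]
    by_cases h1 : c = '$'
    · rw [if_pos h1, if_pos (Or.inl h1), getPriceLoopA_dead cs p true (1 + 1) (Or.inl (by norm_num))]
      simp
    · rw [if_neg h1]
      by_cases h2 : c = '(' ∨ c = ')'
      · rw [if_pos h2, if_pos (Or.inr h2), getPriceLoopA_dead cs p false 1 (Or.inr ⟨rfl, by norm_num⟩)]
        simp
      · rw [if_neg h2, if_pos (show True ∧ True from ⟨trivial, trivial⟩),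
            if_neg (show ¬ (c = '$' ∨ c = '(' ∨ c = ')') from by tauto), ih (p.push c)]
        apply String.ext
        simp

-- before the first '$' (recording off, firstPriceInx = 0) A just scans forward to it
theorem getPriceLoopA_seek : ∀ (l : List Char),
    getPriceLoopA l "" false 0 =
      (match l.dropWhile (· ≠ '$') with
       | [] => ""
       | _ :: rest => String.ofList (getPriceLoopB rest)) := by
  intro l
  induction l with
  | nil => rfl
  | cons c cs ih =>
    simp only [getPriceLoopA]
    by_cases h1 : c = '$'
    · subst h1
      rw [if_pos rfl]
      have h01 : (0 : Int) + 1 = 1 := by norm_num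
      rw [h01, getPriceLoopA_live cs ""]
      simp [List.dropWhile]
    · rw [if_neg h1]
      have hdw : List.dropWhile (fun x => decide (x ≠ '$')) (c :: cs) =
          List.dropWhile (fun x => decide (x ≠ '$')) cs := by
        simp [List.dropWhile, h1]
      by_cases h2 : c = '(' ∨ c = ')'
      · rw [if_pos h2, ih]
        rw [hdw]
      · rw [if_neg h2, if_neg (by rintro ⟨hf, _⟩; exact Bool.noConfusion hf), ih]
        rw [hdw]

-- dropWhile (≠ '$') with a known first-occurrence index equals drop k
theorem dropWhile_ne_eq_drop : ∀ (l : List Char) (k : Nat),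
    l[k]? = some '$' → (∀ i, i < k → l[i]? ≠ some '$') →
    l.dropWhile (· ≠ '$') = l.drop k := by
  intro l
  induction l with
  | nil => intro k h _; simp at h
  | cons c cs ih =>
    intro k hk hmin
    cases k with
    | zero =>
      simp only [List.getElem?_cons_zero, Option.some.injEq] at hk
      subst hk
      simp [List.dropWhile]
    | succ k' =>
      have hc : c ≠ '$' := by
        intro h; exact hmin 0 (Nat.succ_pos _) (by simp [h])
      simp only [List.getElem?_cons_succ] at hk
      rw [List.drop_succ_cons]
      have hrec : cs.dropWhile (· ≠ '$') = cs.drop k' :=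
        ih k' hk (fun i hi h => hmin (i + 1) (by omega) (by simpa using h))
      simpa [List.dropWhile, hc] using hrec

-- singleton-prefix of a drop is an indexed lookup
theorem singleton_prefix_drop_iff (l : List Char) (k : Nat) :
    ['$'] <+: l.drop k ↔ l[k]? = some '$' := by
  constructor
  · rintro ⟨t, ht⟩
    have h0 : (l.drop k)[0]? = some '$' := by rw [← ht]; rfl
    simpa [List.getElem?_drop] using h0
  · intro h
    have hk : k < l.length := by
      by_contra hc
      simp [List.getElem?_eq_none (by omega : l.length ≤ k)] at h
    have hget : l[k] = '$' := by
      have hh := List.getElem?_eq_getElem hk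
      rw [hh] at h
      injection h
    refine ⟨l.drop (k + 1), ?_⟩
    rw [List.drop_eq_getElem_cons hk, hget]
    rfl

-- ['$'] is an infix iff '$' is a member
theorem singleton_infix_iff_mem (l : List Char) (c : Char) : [c] <:+: l ↔ c ∈ l := by
  constructor
  · intro h; exact h.mem (List.mem_singleton_self c)
  · intro h
    obtain ⟨s, t, heq⟩ := List.append_of_mem h
    exact ⟨s, t, by rw [heq]; simp⟩

-- B's find-based partition equals the dropWhile characterisation of A's scan
theorem bridge (l : List Char) :
    (if PySem.Chars.find l ['$'] = -1 then ""
     else String.ofList (getPriceLoopB (l.drop ((PySem.Chars.find l ['$']).toNat + 1)))) =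
      (match l.dropWhile (· ≠ '$') with
       | [] => ""
       | _ :: rest => String.ofList (getPriceLoopB rest)) := by
  by_cases hfind : PySem.Chars.find l ['$'] = -1
  · rw [if_pos hfind]
    have hno : ¬ ['$'] <:+: l := (PySem.Chars.find_eq_neg_one_iff _ _).mp hfind
    have hmem : '$' ∉ l := fun hm => hno ((singleton_infix_iff_mem l '$').mpr hm)
    have hdw : l.dropWhile (· ≠ '$') = [] := by
      rw [List.dropWhile_eq_nil_iff]
      intro x hx
      simp only [ne_eq, decide_eq_true_eq]
      rintro rfl; exact hmem hx
    rw [hdw]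
  · rw [if_neg hfind]
    have hpos : 0 ≤ PySem.Chars.find l ['$'] := by
      have := PySem.Chars.neg_one_le_find l ['$']
      omega
    obtain ⟨hpre, hmin⟩ := PySem.Chars.find_spec (s := l) (sub := ['$']) hpos
    set k := (PySem.Chars.find l ['$']).toNat with hkdef
    have hk : l[k]? = some '$' := (singleton_prefix_drop_iff l k).mp hpre
    have hmin' : ∀ i, i < k → l[i]? ≠ some '$' := fun i hi h =>
      hmin i hi ((singleton_prefix_drop_iff l i).mpr h)
    rw [dropWhile_ne_eq_drop l k hk hmin']
    have hklen : k < l.length := by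
      by_contra hc
      simp [List.getElem?_eq_none (by omega : l.length ≤ k)] at hk
    rw [List.drop_eq_getElem_cons hklen]

-- ===== VERDICT (by name: the statement is the Claim_ definition above) =====
theorem getPrice_spec : Claim_equal_getPrice := by
  intro title _ hpre
  unfold Spec_getPrice
  match title with
  | none => exact absurd rfl hpre
  | some s =>
    simp only [getPrice, getPrice_alt]
    rw [getPriceLoopA_seek, ← bridge]
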